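-- pv_equiv track=rewrite | github.com/GregsonProjectsAI/ThoughtReach | app/services/ingestion.py | parse_claude_export
-- ===== SOURCE A (Python) =====
-- def parse_claude_export(raw_text: str) -> list[dict]:
--     lines = raw_text.strip().splitlines()
--     messages = []
--     current_role = "unknown"
--     current_lines = []
--     for line in lines:
--         stripped = line.strip()
--         lower_line = stripped.lower()
--         if lower_line.startswith("human:") or lower_line.startswith("assistant:"):
--             if current_lines:
--                 content = "\n".join(current_lines).strip()
--                 if content:
--                     messages.append({"role": current_role, "content": content})
--                 current_lines = []
--             if lower_line.startswith("human:"):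
--                 current_role = "user"
--                 inline = stripped[6:].strip()
--             else:
--                 current_role = "assistant"
--                 inline = stripped[10:].strip()
--             if inline:
--                 current_lines.append(inline)
--         else:
--             current_lines.append(line.rstrip())
--     if current_lines:
--         content = "\n".join(current_lines).strip()
--         if content:
--             messages.append({"role": current_role, "content": content})
--     return messages
-- ===== SOURCE B (Python) =====
-- def _emit(role, parts, out):
--     # Prepend {role, content} to out when the joined parts strip to non-empty.
--     content = "\n".join(parts).strip()
--     if content:
--         return [{"role": role, "content": content}] + out
--     return out
--
--
-- def parse_claude_export(raw_text: str) -> list[dict]: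
--     # Back-to-front scan: `buf` holds the lines sitting below the last marker
--     # seen so far (in document order); meeting a marker closes that block and
--     # prepends its message, so no flush/role state has to be carried forward.
--     out = []
--     buf = []
--     for line in reversed(raw_text.strip().splitlines()):
--         s = line.strip()
--         low = s.lower()
--         if low.startswith("human:"):
--             inline = s[6:].strip()
--             out = _emit("user", ([inline] if inline else []) + buf, out)
--             buf = []
--         elif low.startswith("assistant:"):
--             inline = s[10:].strip()
--             out = _emit("assistant", ([inline] if inline else []) + buf, out)
--             buf = []
--         else:
--             buf = [line.rstrip()] + buf
--     return _emit("unknown", buf, out)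
-- ===== Notes on version B (the rewrite author's own statement) =====
-- stated objective: alternative
-- what changed: Replaced A's forward stateful loop (messages + current_role + current_lines with a flush duplicated inside and after the loop) by a back-to-front scan: traversing the lines in reverse, a marker line immediately closes the block of lines collected below it and prepends its message, so no carried role/flush state is needed.
import Mathlib
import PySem

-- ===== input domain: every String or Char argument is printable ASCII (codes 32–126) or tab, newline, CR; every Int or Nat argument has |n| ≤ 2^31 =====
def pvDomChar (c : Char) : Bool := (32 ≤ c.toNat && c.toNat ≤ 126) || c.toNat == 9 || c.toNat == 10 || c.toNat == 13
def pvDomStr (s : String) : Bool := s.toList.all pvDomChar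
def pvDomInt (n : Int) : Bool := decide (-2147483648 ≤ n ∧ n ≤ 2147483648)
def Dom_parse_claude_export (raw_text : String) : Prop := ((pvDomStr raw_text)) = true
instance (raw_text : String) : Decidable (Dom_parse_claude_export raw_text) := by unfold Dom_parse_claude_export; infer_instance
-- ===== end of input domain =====

-- B replaces A's forward loop with carried role/flush state by a back-to-front
-- scan that closes each block when its marker is met; same return value (alternative).

-- ===== PORT A =====
-- A's flush: append the current block's content to messages when non-empty
-- (this exact code appears twice in A: inside the loop and after it).
def pcFlushA (msgs : List (List (String × String))) (role : String)
    (cls : List String) : List (List (String × String)) :=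
  if cls ≠ [] then
    let content := PySem.Str.strip (PySem.Str.join "\n" cls)
    if content ≠ "" then msgs ++ [[("role", role), ("content", content)]] else msgs
  else msgs

-- one iteration of A's loop over (messages, current_role, current_lines)
def pcStepA (st : List (List (String × String)) × String × List String)
    (line : String) : List (List (String × String)) × String × List String :=
  let stripped := PySem.Str.strip line
  let lower := PySem.Str.lower stripped
  if PySem.Str.startswith lower "human:" || PySem.Str.startswith lower "assistant:" then
    let msgs := pcFlushA st.1 st.2.1 st.2.2
    let role := if PySem.Str.startswith lower "human:" then "user" else "assistant"
    let inline := if PySem.Str.startswith lower "human:" then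
        PySem.Str.strip (PySem.Str.slice stripped (some 6) none)
      else PySem.Str.strip (PySem.Str.slice stripped (some 10) none)
    (msgs, role, if inline ≠ "" then [inline] else [])
  else
    (st.1, st.2.1, st.2.2 ++ [PySem.Str.rstrip line])

def parse_claude_export (raw_text : String) : List (List (String × String)) :=
  let lines := PySem.Str.splitlines (PySem.Str.strip raw_text)
  let st := lines.foldl pcStepA ([], "unknown", [])
  pcFlushA st.1 st.2.1 st.2.2

-- ===== PORT B =====
-- Source B's _emit: prepend {role, content} to out when the joined parts strip non-empty
def pbEmit (role : String) (parts : List String)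
    (out : List (List (String × String))) : List (List (String × String)) :=
  let content := PySem.Str.strip (PySem.Str.join "\n" parts)
  if content ≠ "" then [("role", role), ("content", content)] :: out else out

-- one iteration of Source B's reversed loop over (out, buf)
def pbStep (st : List (List (String × String)) × List String) (line : String) :
    List (List (String × String)) × List String :=
  let s := PySem.Str.strip line
  let low := PySem.Str.lower s
  if PySem.Str.startswith low "human:" then
    let inline := PySem.Str.strip (PySem.Str.slice s (some 6) none)
    (pbEmit "user" ((if inline ≠ "" then [inline] else []) ++ st.2) st.1, [])
  else if PySem.Str.startswith low "assistant:" then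
    let inline := PySem.Str.strip (PySem.Str.slice s (some 10) none)
    (pbEmit "assistant" ((if inline ≠ "" then [inline] else []) ++ st.2) st.1, [])
  else
    (st.1, [PySem.Str.rstrip line] ++ st.2)

def parse_claude_export_alt (raw_text : String) : List (List (String × String)) :=
  let lines := PySem.Str.splitlines (PySem.Str.strip raw_text)
  let st := lines.reverse.foldl pbStep ([], [])
  pbEmit "unknown" st.2 st.1

-- ===== PRECONDITION & SPEC =====
def Spec_parse_claude_export (raw_text : String) (out : List (List (String × String))) : Prop := out = parse_claude_export_alt raw_text
instance (raw_text : String) (out : List (List (String × String))) : Decidable (Spec_parse_claude_export raw_text out) := by unfold Spec_parse_claude_export; infer_instance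

-- ===== CLAIM (what is proved, stated in full; the proofs are below) =====
def Claim_equal_parse_claude_export : Prop := ∀ (raw_text : String), Dom_parse_claude_export raw_text → Spec_parse_claude_export raw_text (parse_claude_export raw_text)

-- ===== LEMMAS AND PROOFS =====

-- proof-only helper: the 0-or-1 message list a block (role, parts) renders to
def pbOne (r : String) (p : List String) : List (List (String × String)) :=
  pbEmit r p []

theorem pbEmit_eq (r : String) (p : List String)
    (out : List (List (String × String))) : pbEmit r p out = pbOne r p ++ out := by
  simp only [pbEmit, pbOne]
  split_ifs <;> simp

theorem pcFlushA_eq_pbOne (m : List (List (String × String))) (r : String)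
    (c : List String) : pcFlushA m r c = m ++ pbOne r c := by
  cases c with
  | nil => simp [pcFlushA, pbOne, pbEmit, PySem.Str.join, PySem.Chars.join, PySem.Str.strip,
      PySem.Chars.strip, PySem.Chars.lstrip, PySem.Chars.rstrip, List.intercalate]
  | cons h t =>
      simp only [pcFlushA, pbOne, pbEmit]
      split_ifs <;> simp_all

-- the messages A will still produce from state (role, cls) on the remaining lines
def msgsFrom (r : String) (c : List String) : List String → List (List (String × String))
  | [] => pbOne r c
  | line :: tl =>
    let s := PySem.Str.strip line
    let low := PySem.Str.lower s
    if PySem.Str.startswith low "human:" then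
      let inline := PySem.Str.strip (PySem.Str.slice s (some 6) none)
      pbOne r c ++ msgsFrom "user" (if inline ≠ "" then [inline] else []) tl
    else if PySem.Str.startswith low "assistant:" then
      let inline := PySem.Str.strip (PySem.Str.slice s (some 10) none)
      pbOne r c ++ msgsFrom "assistant" (if inline ≠ "" then [inline] else []) tl
    else
      msgsFrom r (c ++ [PySem.Str.rstrip line]) tl

-- A's loop, started from messages m and state (r, c), produces m ++ msgsFrom r c lines
theorem lemA (lines : List String) : ∀ (m : List (List (String × String)))
    (r : String) (c : List String),
    (fun st => pcFlushA st.1 st.2.1 st.2.2) (lines.foldl pcStepA (m, r, c))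
      = m ++ msgsFrom r c lines := by
  induction lines with
  | nil => intro m r c; simpa [msgsFrom] using pcFlushA_eq_pbOne m r c
  | cons line tl ih =>
    intro m r c
    simp only [List.foldl_cons]
    by_cases hh : PySem.Str.startswith (PySem.Str.lower (PySem.Str.strip line)) "human:" = true
    · simp at hh; simp [pcStepA, hh, msgsFrom, ih, pcFlushA_eq_pbOne]
    · simp only [Bool.not_eq_true] at hh; simp at hh
      by_cases ha : PySem.Str.startswith (PySem.Str.lower (PySem.Str.strip line)) "assistant:" = true
      · simp at ha; simp [pcStepA, hh, ha, msgsFrom, ih, pcFlushA_eq_pbOne]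
      · simp only [Bool.not_eq_true] at ha; simp at ha
        simp [pcStepA, hh, ha, msgsFrom, ih]

-- B's right-to-left scan computes the same messages: if (out, buf) is B's state
-- after consuming `lines` from the right, then msgsFrom r c lines renders the
-- pending block (r, c ++ buf) followed by out.
theorem lemB (lines : List String) : ∀ (r : String) (c : List String),
    msgsFrom r c lines
      = pbOne r (c ++ (lines.foldr (fun a b => pbStep b a) ([], [])).2)
          ++ (lines.foldr (fun a b => pbStep b a) ([], [])).1 := by
  induction lines with
  | nil => intro r c; simp [msgsFrom]
  | cons line tl ih =>
    intro r c
    simp only [List.foldr_cons]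
    by_cases hh : PySem.Str.startswith (PySem.Str.lower (PySem.Str.strip line)) "human:" = true
    · simp at hh; simp [msgsFrom, pbStep, hh, ih, pbEmit_eq]
    · simp only [Bool.not_eq_true] at hh; simp at hh
      by_cases ha : PySem.Str.startswith (PySem.Str.lower (PySem.Str.strip line)) "assistant:" = true
      · simp at ha; simp [msgsFrom, pbStep, hh, ha, ih, pbEmit_eq]
      · simp only [Bool.not_eq_true] at ha; simp at ha
        simp [msgsFrom, pbStep, hh, ha, ih]

-- ===== VERDICT (by name: the statement is the Claim_ definition above) =====
theorem parse_claude_export_spec : Claim_equal_parse_claude_export := by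
  intro raw_text _
  unfold Spec_parse_claude_export
  simp only [parse_claude_export, parse_claude_export_alt, List.foldl_reverse, pbEmit_eq]
  have hA := lemA (PySem.Str.splitlines (PySem.Str.strip raw_text)) [] "unknown" []
  have hB := lemB (PySem.Str.splitlines (PySem.Str.strip raw_text)) "unknown" []
  simp only [List.nil_append] at hA hB
  exact hA.trans hB
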